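-- pv_equiv track=rewrite | github.com/bopopescu/lazero | bookgrep/example/wrapMeUp.py | globalCounter
-- ===== SOURCE A (Python) =====
-- import copy
--
-- def processor(a, b):
--   for b0 in b:
--     if a in b0:
--       if a == b0[0]:
--         return b0, 1
--       else:
--         return b0, -1
--   return None
--
-- def globalCounter(a, b):
--   fl=range(len(a))
--   b0 = {x: 0 for x in b}
--   b1=[]
--   for lf in fl:
--     af = processor(a[lf], b)
--     if af != None:
--       b0[af[0]] += af[1]
--     bs=copy.copy(b0)
--     b1.append(bs)
--   return b1
-- ===== SOURCE B (Python) =====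
-- import copy
--
-- def globalCounter(a, b):
--     # Two passes: memoized first-match lookup per distinct item of a, then a
--     # single accumulation pass over the precomputed deltas.
--     cache = {}
--     def hit(x):
--         if x not in cache:
--             m = next((c for c in b if x in c), None)
--             cache[x] = None if m is None else (m, 1 if x == m[0] else -1)
--         return cache[x]
--     deltas = [hit(x) for x in a]
--     counts = dict.fromkeys(b, 0)
--     out = []
--     for h in deltas:
--         if h is not None:
--             counts[h[0]] += h[1]
--         out.append(copy.copy(counts))
--     return out
-- ===== Notes on version B (the rewrite author's own statement) =====
-- stated objective: alternative
-- what changed: B splits A's single index loop into two passes — a memoized first-match lookup (cached per distinct item of a, computed via a first-match find instead of A's return-per-branch helper) producing a list of deltas, then one accumulation pass over those deltas — instead of re-scanning b from scratch at every position of a.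
import Mathlib
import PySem

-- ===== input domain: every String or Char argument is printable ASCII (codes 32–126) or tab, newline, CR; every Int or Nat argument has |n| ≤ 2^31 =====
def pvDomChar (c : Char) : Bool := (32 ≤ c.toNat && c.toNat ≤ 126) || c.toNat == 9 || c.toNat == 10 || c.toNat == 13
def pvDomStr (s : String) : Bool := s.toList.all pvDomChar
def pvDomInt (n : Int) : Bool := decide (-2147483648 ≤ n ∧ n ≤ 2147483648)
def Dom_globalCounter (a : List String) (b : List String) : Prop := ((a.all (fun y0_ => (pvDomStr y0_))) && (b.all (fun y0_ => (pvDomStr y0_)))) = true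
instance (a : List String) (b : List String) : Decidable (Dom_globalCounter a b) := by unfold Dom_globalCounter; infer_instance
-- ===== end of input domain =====

-- B replaces A's per-index re-scan of b with a memoized first-match lookup and a
-- separate accumulation pass over the precomputed deltas (alternative decomposition).


-- ===== PORT A =====
-- processor(a, b): scan b, return (b0, ±1) at the first b0 containing a (Python substring test).
-- On 'a == b0[0]' with b0 = "" Python raises IndexError (only reachable for a = "", b0 = "");
-- the port returns none there; those inputs are excluded by Pre_globalCounter.
def processorA (x : String) : List String → Option (String × Int)
  | [] => none
  | c :: rest =>
    if PySem.Str.isIn x c then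
      match PySem.Str.pyGet? c 0 with
      | some ch => if x == String.ofList [ch] then some (c, 1) else some (c, -1)
      | none => none
    else processorA x rest

-- the body of A's 'for lf in fl' loop: update b0 by af, append the snapshot
def stepA (b : List String) (st : PySem.Dict String Int × List (List (String × Int)))
    (x : String) : PySem.Dict String Int × List (List (String × Int)) :=
  let af := processorA x b
  let d := match af with
    | some kv => st.1.modify kv.1 0 (· + kv.2)
    | none => st.1
  (d, st.2 ++ [d.items])

def globalCounter (a : List String) (b : List String) : List (List (String × Int)) :=
  let fl := PySem.List.pyRange 0 (PySem.List.len a)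
  let b0 : PySem.Dict String Int := b.foldl (fun d x => d.insert x 0) PySem.Dict.empty
  (fl.foldl (fun st lf => stepA b st (PySem.List.pyGetD a lf "")) (b0, [])).2

-- ===== PORT B =====
-- hit(x) uncached: first c in b with x in c, mapped to its sign pair (none on
-- Python's IndexError corner, excluded by Pre_globalCounter).
def hitB (b : List String) (x : String) : Option (String × Int) :=
  match b.find? (fun c => PySem.Str.isIn x c) with
  | none => none
  | some m =>
    match PySem.Str.pyGet? m 0 with
    | some ch => some (m, if x == String.ofList [ch] then 1 else -1)
    | none => none

-- the memoizing comprehension [hit(x) for x in a]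
def deltasB (a b : List String) : List (Option (String × Int)) :=
  (a.foldl (fun (st : PySem.Dict String (Option (String × Int)) × List (Option (String × Int))) x =>
      let cache := if st.1.contains x then st.1 else st.1.insert x (hitB b x)
      (cache, st.2 ++ [cache.getD x none])) (PySem.Dict.empty, [])).2

-- the body of B's accumulation pass over the precomputed deltas
def stepB (st : PySem.Dict String Int × List (List (String × Int)))
    (h : Option (String × Int)) : PySem.Dict String Int × List (List (String × Int)) :=
  let d := match h with
    | some kv => st.1.modify kv.1 0 (· + kv.2)
    | none => st.1
  (d, st.2 ++ [d.items])

def globalCounter_alt (a : List String) (b : List String) : List (List (String × Int)) :=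
  let counts : PySem.Dict String Int := b.foldl (fun d x => d.insert x 0) PySem.Dict.empty
  ((deltasB a b).foldl stepB (counts, [])).2

-- ===== PRECONDITION & SPEC =====
-- Pre_ excludes exactly the inputs where both Pythons raise IndexError: a contains ""
-- and the first element of b is "" (then "" in "" matches and b0[0] is evaluated on "").
def Pre_globalCounter (a : List String) (b : List String) : Prop :=
  ¬ ("" ∈ a ∧ b.head? = some "")
instance (a : List String) (b : List String) : Decidable (Pre_globalCounter a b) := by
  unfold Pre_globalCounter; infer_instance

def pvWitness_globalCounter : List String × List String := (["ab", "c"], ["abc", ""])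

def Spec_globalCounter (a : List String) (b : List String) (out : List (List (String × Int))) : Prop := out = globalCounter_alt a b
instance (a : List String) (b : List String) (out : List (List (String × Int))) : Decidable (Spec_globalCounter a b out) := by unfold Spec_globalCounter; infer_instance

-- ===== CLAIM (what is proved, stated in full; the proofs are below) =====
def Claim_equal_globalCounter : Prop := ∀ (a : List String) (b : List String), Dom_globalCounter a b → Pre_globalCounter a b → Spec_globalCounter a b (globalCounter a b)

-- ===== LEMMAS AND PROOFS =====

-- the two first-match scans compute the same value (on every input, raising corner included)
theorem processorA_eq_hitB (x : String) (b : List String) : processorA x b = hitB b x := by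
  induction b with
  | nil => rfl
  | cons c rest ih =>
    by_cases h : PySem.Str.isIn x c = true
    · rw [hitB, List.find?_cons_of_pos h]
      simp only [processorA, if_pos h]
      cases PySem.Str.pyGet? c 0 with
      | none => rfl
      | some ch => cases h2 : (x == String.ofList [ch]) <;> simp [h2]
    · rw [hitB, List.find?_cons_of_neg (by simpa using h), ← hitB]
      simp only [processorA, h, Bool.false_eq_true, if_false, ih]

theorem stepA_eq_stepB (b : List String) (st : PySem.Dict String Int × List (List (String × Int)))
    (x : String) : stepA b st x = stepB st (hitB b x) := by
  rw [stepA.eq_def, stepB.eq_def, processorA_eq_hitB]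

-- the memoized comprehension is the plain map: the cache always stores hitB b k at key k
theorem deltasB_foldl (a b : List String)
    (cache : PySem.Dict String (Option (String × Int)))
    (acc : List (Option (String × Int)))
    (hc : ∀ k, cache.contains k = true → cache.getD k none = hitB b k) :
    (a.foldl (fun (st : PySem.Dict String (Option (String × Int)) × List (Option (String × Int))) x =>
      let cache := if st.1.contains x then st.1 else st.1.insert x (hitB b x)
      (cache, st.2 ++ [cache.getD x none])) (cache, acc)).2 = acc ++ a.map (hitB b) := by
  induction a generalizing cache acc with
  | nil => simp
  | cons x rest ih =>
    simp only [List.foldl_cons, List.map_cons]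
    by_cases hx : cache.contains x = true
    · simp only [hx, if_true]
      rw [ih cache _ hc, hc x hx]
      simp
    · simp only [Bool.not_eq_true] at hx
      simp only [hx, Bool.false_eq_true, if_false]
      have hget : (cache.insert x (hitB b x)).getD x none = hitB b x :=
        PySem.Dict.getD_insert_self _ _ _ _
      rw [ih _ _ ?_, hget]
      · simp
      · intro k hk
        by_cases hkx : k = x
        · subst hkx; rw [hget]
        · rw [PySem.Dict.getD_insert_of_ne _ _ _ hkx]
          rw [PySem.Dict.contains_insert] at hk
          simp [hkx] at hk
          exact hc k hk

theorem deltasB_eq_map (a b : List String) : deltasB a b = a.map (hitB b) := by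
  unfold deltasB
  rw [deltasB_foldl a b _ [] (by intro k hk; simp [PySem.Dict.contains_empty] at hk)]
  simp

-- ===== VERDICT (by name: the statement is the Claim_ definition above) =====
theorem globalCounter_spec : Claim_equal_globalCounter := by
  intro a b _ _
  unfold Spec_globalCounter
  simp only [globalCounter, globalCounter_alt]
  rw [PySem.List.foldl_pyRange_zero_pyGetD a "" (stepA b), deltasB_eq_map, List.foldl_map]
  have h : stepA b = fun st x => stepB st (hitB b x) :=
    funext fun st => funext fun x => stepA_eq_stepB b st x
  rw [h]
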